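-- pv_equiv track=rewrite | github.com/hellraze/tensor | Task3/task3.py | generate_versions
-- ===== SOURCE A (Python) =====
-- import itertools
--
-- def generate_versions(template):
--     parts = template.split('.')
--
--     options = []
--     for part in parts:
--         if part == '*':
--             options.append(['0', '1', '2'])
--         else:
--             options.append([part])
--
--     all_combinations = itertools.product(*options)
--
--     versions = ['.'.join(combination) for combination in all_combinations]
--     return versions
-- ===== SOURCE B (Python) =====
-- def generate_versions(template):
--     # Index-based enumeration: version k is obtained by decoding k in base 3 and
--     # substituting the digits for the wildcards, instead of expanding option lists.
--     parts = template.split('.')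
--     w = parts.count('*')
--     versions = []
--     for n in range(3 ** w):
--         digits = []
--         x = n
--         for _ in range(w):
--             digits.append(str(x % 3))
--             x //= 3
--         digits.reverse()
--         out = []
--         i = 0
--         for p in parts:
--             if p == '*':
--                 out.append(digits[i])
--                 i += 1
--             else:
--                 out.append(p)
--         versions.append('.'.join(out))
--     return versions
-- ===== Notes on version B (the rewrite author's own statement) =====
-- stated objective: alternative
-- what changed: Replaces the per-part options table plus itertools.product with index-based enumeration: count the wildcards w, loop n over range(3**w), decode n into base-3 digits and substitute them at the wildcard positions while walking the parts.
import Mathlib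
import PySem

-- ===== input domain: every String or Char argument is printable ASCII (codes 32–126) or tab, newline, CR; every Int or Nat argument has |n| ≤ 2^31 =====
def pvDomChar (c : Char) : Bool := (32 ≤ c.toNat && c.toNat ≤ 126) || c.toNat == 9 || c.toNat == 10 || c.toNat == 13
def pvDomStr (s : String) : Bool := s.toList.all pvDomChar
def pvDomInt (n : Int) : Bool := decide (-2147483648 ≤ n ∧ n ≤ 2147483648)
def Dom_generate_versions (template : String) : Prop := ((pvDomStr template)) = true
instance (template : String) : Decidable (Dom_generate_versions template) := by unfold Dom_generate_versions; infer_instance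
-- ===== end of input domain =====

-- B replaces the per-part options table + itertools.product of A by index-based
-- enumeration: loop n over range(3^w), decode n in base 3 and substitute the digits
-- at the wildcard positions (objective: alternative algorithm, same output).

-- ===== PORT A =====
-- 'for part in parts: options.append(...)' — the accumulating loop of A
def pvOptionsLoop (parts : List String) : List (List String) :=
  parts.foldl (fun options part =>
    if part == "*" then options ++ [["0", "1", "2"]] else options ++ [[part]]) []

-- itertools.product(*options): all combinations, leftmost factor varying slowest
def pvProduct : List (List String) → List (List String)
  | [] => [[]]
  | o :: rest => o.flatMap (fun x => (pvProduct rest).map (x :: ·))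

def generate_versions (template : String) : List String :=
  let parts := (PySem.Chars.splitOn template.toList ['.']).map String.ofList
  let options := pvOptionsLoop parts
  (pvProduct options).map (fun combination => PySem.Str.join "." combination)

-- ===== PORT B =====
-- 'digits = []; x = n; for _ in range(w): digits.append(str(x % 3)); x //= 3'
-- (x stays nonnegative, so str(x % 3) is exact as PySem.Int.toStr of the Nat remainder)
def pvDigits : Nat → Nat → List String
  | 0, _ => []
  | w + 1, x => PySem.Int.toStr ((x % 3 : Nat) : Int) :: pvDigits w (x / 3)

-- 'out = []; i = 0; for p in parts: …' — consuming digits[i]; i += 1 is reading and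
-- dropping the head of the remaining digit list. The [] branch is unreachable
-- (Python would raise IndexError; exactly count('*') digits are always supplied).
def pvFill : List String → List String → List String
  | [], _ => []
  | p :: ps, ds =>
    if p == "*" then
      match ds with
      | d :: ds' => d :: pvFill ps ds'
      | [] => []
    else p :: pvFill ps ds

def generate_versions_alt (template : String) : List String :=
  let parts := (PySem.Chars.splitOn template.toList ['.']).map String.ofList
  let w := parts.count "*"
  -- range(3 ** w) over nonnegative n: List.range is exact here
  (List.range (3 ^ w)).map (fun n =>
    PySem.Str.join "." (pvFill parts ((pvDigits w n).reverse)))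

-- ===== PRECONDITION & SPEC =====
def Spec_generate_versions (template : String) (out : List String) : Prop := out = generate_versions_alt template
instance (template : String) (out : List String) : Decidable (Spec_generate_versions template out) := by unfold Spec_generate_versions; infer_instance

-- ===== CLAIM (what is proved, stated in full; the proofs are below) =====
def Claim_equal_generate_versions : Prop := ∀ (template : String), Dom_generate_versions template → Spec_generate_versions template (generate_versions template)

-- ===== LEMMAS AND PROOFS =====

def pvOpts (part : String) : List String :=
  if part == "*" then ["0", "1", "2"] else [part]

theorem pvOptionsLoop_eq_map (parts : List String) (acc : List (List String)) :
    parts.foldl (fun options part =>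
      if part == "*" then options ++ [["0", "1", "2"]] else options ++ [[part]]) acc
    = acc ++ parts.map pvOpts := by
  induction parts generalizing acc with
  | nil => simp
  | cons p ps ih =>
      rw [List.foldl_cons, ih]
      by_cases h : p = "*" <;> simp [pvOpts, h]

-- MSB-first digit decomposition: decoding d·3^w + k (k < 3^w, d < 3) prepends digit d
theorem pvDigits_rev_split (w : Nat) : ∀ d k : Nat, k < 3 ^ w → d < 3 →
    (pvDigits (w + 1) (d * 3 ^ w + k)).reverse
      = PySem.Int.toStr ((d : Nat) : Int) :: (pvDigits w k).reverse := by
  induction w with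
  | zero =>
      intro d k hk hd
      interval_cases k
      simp [pvDigits, Nat.mod_eq_of_lt hd]
  | succ w ih =>
      intro d k hk hd
      have hrw : d * 3 ^ (w + 1) + k = 3 * (d * 3 ^ w) + k := by ring
      have hmod : (d * 3 ^ (w + 1) + k) % 3 = k % 3 := by
        rw [hrw, Nat.mul_add_mod]
      have hdiv : (d * 3 ^ (w + 1) + k) / 3 = d * 3 ^ w + k / 3 := by
        rw [hrw, Nat.mul_add_div (by norm_num)]
      have hk3 : k / 3 < 3 ^ w := by
        apply Nat.div_lt_of_lt_mul
        calc k < 3 ^ (w + 1) := hk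
          _ = 3 * 3 ^ w := by ring
      show (pvDigits (w + 1 + 1) (d * 3 ^ (w + 1) + k)).reverse = _
      rw [pvDigits, hmod, hdiv, List.reverse_cons, ih d (k / 3) hk3 hd]
      show (PySem.Int.toStr ((d : Nat) : Int) :: (pvDigits w (k / 3)).reverse)
            ++ [PySem.Int.toStr ((k % 3 : Nat) : Int)] = _
      rw [List.cons_append]
      congr 1
      show _ = (pvDigits (w + 1) k).reverse
      rw [pvDigits, List.reverse_cons]

-- Main invariant: enumerating range(3^w) and filling the wildcards is itertools.product
theorem pvFill_range (parts : List String) :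
    (List.range (3 ^ parts.count "*")).map
        (fun n => pvFill parts ((pvDigits (parts.count "*") n).reverse))
      = pvProduct (parts.map pvOpts) := by
  induction parts with
  | nil => simp [pvFill, pvProduct]
  | cons p ps ih =>
      by_cases hp : p = "*"
      · subst hp
        have hc : (("*" : String) :: ps).count "*" = ps.count "*" + 1 := by
          simp
        rw [hc]
        set w := ps.count "*" with hw
        set m := 3 ^ w with hm
        have h3 : 3 ^ (w + 1) = m + (m + m) := by rw [hm]; ring
        have hblk : ∀ d : Nat, d < 3 →
            (List.range m).map (fun k =>
              pvFill ("*" :: ps) ((pvDigits (w + 1) (d * m + k)).reverse))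
            = (pvProduct (ps.map pvOpts)).map
                ((PySem.Int.toStr ((d : Nat) : Int)) :: ·) := by
          intro d hd
          rw [← ih, List.map_map]
          apply List.map_congr_left
          intro k hk
          rw [List.mem_range] at hk
          simp only [Function.comp]
          rw [pvDigits_rev_split w d k (hm ▸ hk) hd]
          simp [pvFill]
        have b0 := hblk 0 (by norm_num)
        have b1 := hblk 1 (by norm_num)
        have b2 := hblk 2 (by norm_num)
        have ht0 : PySem.Int.toStr ((0 : Nat) : Int) = "0" := by decide
        have ht1 : PySem.Int.toStr ((1 : Nat) : Int) = "1" := by decide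
        have ht2 : PySem.Int.toStr ((2 : Nat) : Int) = "2" := by decide
        simp only [Nat.zero_mul, Nat.zero_add, ht0] at b0
        simp only [Nat.one_mul, ht1] at b1
        simp only [Nat.two_mul, Nat.add_assoc, ht2] at b2
        rw [h3, List.range_add, List.range_add]
        simp only [List.map_append, List.map_map, Function.comp_def]
        rw [b0, b1, b2]
        simp [pvProduct, pvOpts]
      · have hc : (p :: ps).count "*" = ps.count "*" := by
          simp [hp]
        rw [hc]
        have : pvProduct ((p :: ps).map pvOpts)
            = (pvProduct (ps.map pvOpts)).map (p :: ·) := by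
          simp [pvProduct, pvOpts, hp]
        rw [this, ← ih, List.map_map]
        apply List.map_congr_left
        intro k _
        simp [Function.comp, pvFill, hp]

-- ===== VERDICT (by name: the statement is the Claim_ definition above) =====
theorem generate_versions_spec : Claim_equal_generate_versions := by
  intro template _
  unfold Spec_generate_versions generate_versions generate_versions_alt
  simp only [pvOptionsLoop, pvOptionsLoop_eq_map, List.nil_append]
  rw [← pvFill_range, List.map_map]
  simp only [Function.comp_def]
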